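-- pv_equiv track=rewrite | github.com/leuchtum/gcaudiosync | gcaudiosync/gcanalyser/gcanalyser.py | remove_comments_in_brackets
-- ===== SOURCE A (Python) =====
-- def remove_comments_in_brackets(line: str) -> str:
--     '''
--     Removes comments in round brackets () from a string
--
--     Args:
--         line: String with comments. Every open bracket must have a closing one!
--
--     Retruns:
--         line without comments in round brackets
--     '''
--     new_line = ""                                                                       # str to save the new line
--     level = 0                                                                           # "level" of comment
--
--     for char in line:                                                                   # loop the line
--         if char == "(":                                                                     # start of comment found
--             level +=1                                                                           # go level up
--         elif char == ")":                                                                   # end of comment found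
--             level -=1                                                                           # go level down
--         elif level == 0:                                                                    # character is not in comment
--             new_line = new_line + char                                                          # add character to new line
--
--     if level != 0:                                                                      # error because of inappropriate use of brackets
--         raise Exception("Brackets in line not properly used: " + line)
--
--     return new_line
-- ===== SOURCE B (Python) =====
-- def remove_comments_in_brackets(line: str) -> str:
--     # delta per character: +1 for '(', -1 for ')', 0 otherwise
--     delta = [1 if c == "(" else -1 if c == ")" else 0 for c in line]
--     # depths[i] = nesting depth BEFORE character i (running prefix sum)
--     depths = []
--     depth = 0
--     for d in delta:
--         depths.append(depth)
--         depth += d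
--     if depth != 0:
--         raise Exception("Brackets in line not properly used: " + line)
--     # keep every non-bracket character whose preceding depth is 0
--     return "".join(c for c, d0, d in zip(line, depths, delta) if d == 0 and d0 == 0)
-- ===== Notes on version B (the rewrite author's own statement) =====
-- stated objective: alternative
-- what changed: Replaces the single interleaved scan with stateful filtering by a delta table plus a prefix-sum depth table, then a separate filter/join pass keeping non-bracket characters at depth 0.
import Mathlib
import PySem

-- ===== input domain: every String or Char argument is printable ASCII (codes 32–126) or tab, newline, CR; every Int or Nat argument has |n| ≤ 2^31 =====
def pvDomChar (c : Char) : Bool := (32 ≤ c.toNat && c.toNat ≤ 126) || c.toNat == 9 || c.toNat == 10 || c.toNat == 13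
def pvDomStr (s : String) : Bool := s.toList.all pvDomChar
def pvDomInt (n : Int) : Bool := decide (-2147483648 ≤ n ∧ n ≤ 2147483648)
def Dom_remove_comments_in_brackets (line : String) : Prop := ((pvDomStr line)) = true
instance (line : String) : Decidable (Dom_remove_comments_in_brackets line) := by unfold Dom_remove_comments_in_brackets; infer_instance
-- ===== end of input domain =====

-- B replaces A's single interleaved scan with a delta table + prefix-depth table and a separate filter pass (alternative decomposition, same result).


-- ===== PORT A =====
-- A: one scan with a level counter; characters are appended only at level 0.
-- (The raise on unbalanced brackets is excluded by Pre_ below.)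
def remove_comments_in_brackets (line : String) : String :=
  let st := line.toList.foldl
    (fun (st : List Char × Int) c =>
      if c = '(' then (st.1, st.2 + 1)
      else if c = ')' then (st.1, st.2 - 1)
      else if st.2 = 0 then (st.1 ++ [c], st.2)
      else st)
    ([], 0)
  String.mk st.1

-- ===== PORT B =====
-- B: delta table, prefix-depth table, then filter/join of depth-0 non-bracket chars.
def pvDelta (c : Char) : Int := if c = '(' then 1 else if c = ')' then -1 else 0

def remove_comments_in_brackets_alt (line : String) : String :=
  let delta := line.toList.map pvDelta
  let st := delta.foldl
    (fun (st : List Int × Int) d => (st.1 ++ [st.2], st.2 + d))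
    ([], 0)
  -- (the raise when st.2 ≠ 0 is excluded by Pre_ below)
  String.mk (((line.toList.zip (st.1.zip delta)).filter
      (fun p => p.2.2 = 0 ∧ p.2.1 = 0)).map Prod.fst)

-- ===== PRECONDITION & SPEC =====
-- Pre_ excludes exactly the inputs where A raises Exception (unbalanced brackets):
-- the signed count of '(' minus ')' must be 0.
def Pre_remove_comments_in_brackets (line : String) : Prop :=
  (line.toList.map (fun c => if c = '(' then (1 : Int) else if c = ')' then -1 else 0)).sum = 0
instance (line : String) : Decidable (Pre_remove_comments_in_brackets line) := by
  unfold Pre_remove_comments_in_brackets; infer_instance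

def pvWitness_remove_comments_in_brackets : String := "a(b)c"

def Spec_remove_comments_in_brackets (line : String) (out : String) : Prop := out = remove_comments_in_brackets_alt line
instance (line : String) (out : String) : Decidable (Spec_remove_comments_in_brackets line out) := by unfold Spec_remove_comments_in_brackets; infer_instance

-- ===== CLAIM (what is proved, stated in full; the proofs are below) =====
def Claim_equal_remove_comments_in_brackets : Prop := ∀ (line : String), Dom_remove_comments_in_brackets line → Pre_remove_comments_in_brackets line → Spec_remove_comments_in_brackets line (remove_comments_in_brackets line)

-- ===== LEMMAS AND PROOFS =====

-- reference recursion: characters kept starting at depth lvl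
def pvGo : List Char → Int → List Char
  | [], _ => []
  | c :: cs, lvl =>
    if c = '(' then pvGo cs (lvl + 1)
    else if c = ')' then pvGo cs (lvl - 1)
    else if lvl = 0 then c :: pvGo cs lvl
    else pvGo cs lvl

lemma aFold_eq (cs : List Char) : ∀ (acc : List Char) (lvl : Int),
    (cs.foldl (fun (st : List Char × Int) c =>
      if c = '(' then (st.1, st.2 + 1)
      else if c = ')' then (st.1, st.2 - 1)
      else if st.2 = 0 then (st.1 ++ [c], st.2)
      else st) (acc, lvl)).1 = acc ++ pvGo cs lvl := by
  induction cs with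
  | nil => intro acc lvl; simp [pvGo]
  | cons c cs ih =>
    intro acc lvl
    by_cases h1 : c = '('
    · simp [h1, pvGo, ih]
    · by_cases h2 : c = ')'
      · simp [h2, pvGo, ih]
      · by_cases h3 : lvl = 0
        · simp [h1, h2, h3, pvGo, ih]
        · simp [h1, h2, h3, pvGo, ih]

-- prefix-depth list in recursive form
def pvPrefixes : List Int → Int → List Int
  | [], _ => []
  | d :: ds, lvl => lvl :: pvPrefixes ds (lvl + d)

lemma bFold_eq (ds : List Int) : ∀ (acc : List Int) (lvl : Int),
    (ds.foldl (fun (st : List Int × Int) d => (st.1 ++ [st.2], st.2 + d)) (acc, lvl)).1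
      = acc ++ pvPrefixes ds lvl := by
  induction ds with
  | nil => intro acc lvl; simp [pvPrefixes]
  | cons d ds ih => intro acc lvl; simp [pvPrefixes, ih]

lemma bFilter_eq (cs : List Char) : ∀ (lvl : Int),
    (((cs.zip ((pvPrefixes (cs.map pvDelta) lvl).zip (cs.map pvDelta))).filter
      (fun p => p.2.2 = 0 ∧ p.2.1 = 0)).map Prod.fst) = pvGo cs lvl := by
  induction cs with
  | nil => intro lvl; simp [pvGo]
  | cons c cs ih =>
    intro lvl
    simp only [Bool.decide_and] at ih
    by_cases h1 : c = '('
    · simp [h1, pvPrefixes, pvDelta, pvGo, Bool.decide_and, ih]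
    · by_cases h2 : c = ')'
      · simp [h2, pvPrefixes, pvDelta, pvGo, Bool.decide_and, sub_eq_add_neg, ih]
      · by_cases h3 : lvl = 0
        · simp [h1, h2, h3, pvPrefixes, pvDelta, pvGo, Bool.decide_and, ih]
        · simp [h1, h2, h3, pvPrefixes, pvDelta, pvGo, Bool.decide_and, ih]

-- ===== VERDICT (by name: the statement is the Claim_ definition above) =====
theorem remove_comments_in_brackets_spec : Claim_equal_remove_comments_in_brackets := by
  intro line _ _
  show remove_comments_in_brackets line = remove_comments_in_brackets_alt line
  unfold remove_comments_in_brackets remove_comments_in_brackets_alt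
  simp only [aFold_eq, bFold_eq, bFilter_eq, List.nil_append]
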